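-- pv_equiv track=rewrite | github.com/CamWuzHere/blackjack | poker.py | dealer_discard_strategy
-- ===== SOURCE A (Python) =====
-- from collections import Counter
--
-- def dealer_discard_strategy(hand):
--     ranks = [c[0] for c in hand if c[0]!="JOKER"]
--     count = Counter(ranks)
--     keep = set()
--
--     # Never discard Jokers
--     for i,c in enumerate(hand):
--         if c[0]=="JOKER":
--             keep.add(i)
--
--     # Keep pairs or better
--     for rank, qty in count.items():
--         if qty >=2:
--             for i,c in enumerate(hand):
--                 if c[0]==rank:
--                     keep.add(i)
--
--     # Keep high cards
--     for i,c in enumerate(hand):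
--         if c[0] in ("10","J","Q","K","A"):
--             keep.add(i)
--
--     discard = [i for i in range(len(hand)) if i not in keep]
--     return discard
-- ===== SOURCE B (Python) =====
-- def dealer_discard_strategy(hand):
--     # Group card indices by rank (insertion order of first occurrence).
--     groups = {}
--     for i, c in enumerate(hand):
--         groups.setdefault(c[0], []).append(i)
--     # Discard exactly the groups that are a lone, low, non-joker rank.
--     discard = []
--     for rank, idxs in groups.items():
--         if rank != "JOKER" and rank not in ("10", "J", "Q", "K", "A") and len(idxs) < 2:
--             discard.extend(idxs)
--     return sorted(discard)
-- ===== Notes on version B (the rewrite author's own statement) =====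
-- stated objective: alternative
-- what changed: B replaces A's Counter plus keep-index-set built by three passes (one with a nested per-rank rescan of the hand) by a group-by: it buckets card indices per rank in one dict, emits the index buckets of lone low non-joker ranks, and sorts the collected indices.
import Mathlib
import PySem

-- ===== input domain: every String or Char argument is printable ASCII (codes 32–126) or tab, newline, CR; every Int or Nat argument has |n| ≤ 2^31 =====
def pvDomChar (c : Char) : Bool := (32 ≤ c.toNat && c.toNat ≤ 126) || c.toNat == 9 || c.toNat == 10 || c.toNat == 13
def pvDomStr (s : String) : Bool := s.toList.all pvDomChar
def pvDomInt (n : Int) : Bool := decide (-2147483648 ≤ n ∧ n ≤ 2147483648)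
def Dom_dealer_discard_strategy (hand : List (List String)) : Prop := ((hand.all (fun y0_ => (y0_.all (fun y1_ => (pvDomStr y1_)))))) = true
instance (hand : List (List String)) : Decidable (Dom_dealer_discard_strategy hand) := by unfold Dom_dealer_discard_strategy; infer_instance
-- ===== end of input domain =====

-- B replaces A's Counter + keep-index set built by three passes (one nested) with a
-- group-by of indices per rank, emitting the lone low non-joker buckets and sorting them.

-- c[0]; exact whenever c ≠ [] (guaranteed by Pre_; Python raises IndexError on [])
def pvCard0 (c : List String) : String := (PySem.List.pyGet? c 0).getD ""

def pvHighs : List String := ["10", "J", "Q", "K", "A"]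

-- ===== PORT A =====
def dealer_discard_strategy (hand : List (List String)) : List Int :=
  let ranks := (hand.filter (fun c => !(pvCard0 c == "JOKER"))).map pvCard0
  let count := PySem.Dict.counter ranks
  let keep0 : PySem.Set Int := PySem.Set.empty
  -- Never discard Jokers
  let keep1 := (PySem.List.enumerate hand).foldl
    (fun s ic => if pvCard0 ic.2 == "JOKER" then PySem.Set.add s ic.1 else s) keep0
  -- Keep pairs or better
  let keep2 := count.items.foldl
    (fun s rq =>
      if 2 ≤ rq.2 then
        (PySem.List.enumerate hand).foldl
          (fun s ic => if pvCard0 ic.2 == rq.1 then PySem.Set.add s ic.1 else s) s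
      else s) keep1
  -- Keep high cards
  let keep3 := (PySem.List.enumerate hand).foldl
    (fun s ic => if pvHighs.contains (pvCard0 ic.2) then PySem.Set.add s ic.1 else s) keep2
  (PySem.List.pyRange 0 (PySem.List.len hand) 1).filter
    (fun i => !(PySem.Set.contains keep3 i))

-- ===== PORT B =====
def dealer_discard_strategy_alt (hand : List (List String)) : List Int :=
  -- groups.setdefault(c[0], []).append(i)  ==  groups[c[0]] = groups.get(c[0], []) + [i]
  let groups := (PySem.List.enumerate hand).foldl
    (fun d ic => d.modify (pvCard0 ic.2) [] (· ++ [ic.1])) (PySem.Dict.empty : PySem.Dict String (List Int))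
  let discard := groups.items.foldl
    (fun acc ri =>
      if !(ri.1 == "JOKER") && !(pvHighs.contains ri.1) && decide (PySem.List.len ri.2 < 2)
      then acc ++ ri.2 else acc) []
  PySem.List.sorted discard (fun x => x) false

-- ===== PRECONDITION & SPEC =====
-- Pre_: every card is a nonempty list — on a hand containing an empty card, Python's c[0] raises IndexError.
def Pre_dealer_discard_strategy (hand : List (List String)) : Prop := ∀ c ∈ hand, c ≠ []
instance (hand : List (List String)) : Decidable (Pre_dealer_discard_strategy hand) := by
  unfold Pre_dealer_discard_strategy; infer_instance

def pvWitness_dealer_discard_strategy : List (List String) :=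
  [["JOKER"], ["4", "H"], ["4", "S"], ["7", "D"], ["K", "C"]]

def Spec_dealer_discard_strategy (hand : List (List String)) (out : List Int) : Prop := out = dealer_discard_strategy_alt hand
instance (hand : List (List String)) (out : List Int) : Decidable (Spec_dealer_discard_strategy hand out) := by unfold Spec_dealer_discard_strategy; infer_instance

-- ===== CLAIM (what is proved, stated in full; the proofs are below) =====
def Claim_equal_dealer_discard_strategy : Prop := ∀ (hand : List (List String)), Dom_dealer_discard_strategy hand → Pre_dealer_discard_strategy hand → Spec_dealer_discard_strategy hand (dealer_discard_strategy hand)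

-- ===== LEMMAS AND PROOFS =====

-- the Counter A builds, and the per-index keep test A's set encodes
def pvCount (hand : List (List String)) : PySem.Dict String Int :=
  PySem.Dict.counter ((hand.filter (fun c => !(pvCard0 c == "JOKER"))).map pvCard0)

def pvKeepCard (count : PySem.Dict String Int) (c : List String) : Bool :=
  pvCard0 c == "JOKER" || decide (2 ≤ count.getD (pvCard0 c) 0) || pvHighs.contains (pvCard0 c)

-- membership after one conditional-add pass
theorem pv_foldl_add_mem {α : Type} (P : Int × α → Bool) (l : List (Int × α))
    (s : PySem.Set Int) (j : Int) :
    j ∈ l.foldl (fun s ic => if P ic then PySem.Set.add s ic.1 else s) s ↔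
      j ∈ s ∨ ∃ p ∈ l, P p = true ∧ p.1 = j := by
  induction l generalizing s with
  | nil => simp
  | cons p l ih =>
    by_cases h : P p = true
    · simp only [List.foldl_cons, h, if_true, ih, PySem.Set.mem_add, List.mem_cons]
      constructor
      · rintro (( hs | rfl) | ⟨q, hq, hQ, rfl⟩)
        · exact Or.inl hs
        · exact Or.inr ⟨p, Or.inl rfl, h, rfl⟩
        · exact Or.inr ⟨q, Or.inr hq, hQ, rfl⟩
      · rintro (hs | ⟨q, (rfl | hq), hQ, rfl⟩)
        · exact Or.inl (Or.inl hs)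
        · exact Or.inl (Or.inr rfl)
        · exact Or.inr ⟨q, hq, hQ, rfl⟩
    · simp only [List.foldl_cons, h, ih, List.mem_cons]
      constructor
      · rintro (hs | ⟨q, hq, hQ, rfl⟩)
        · exact Or.inl hs
        · exact Or.inr ⟨q, Or.inr hq, hQ, rfl⟩
      · rintro (hs | ⟨q, (rfl | hq), hQ, rfl⟩)
        · exact Or.inl hs
        · exact absurd hQ h
        · exact Or.inr ⟨q, hq, hQ, rfl⟩

-- membership after the nested pairs pass
theorem pv_foldl_nested_mem {α : Type} (Q : String × Int → Prop) [DecidablePred Q]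
    (R : String × Int → Int × α → Bool) (items : List (String × Int))
    (enum : List (Int × α)) (s : PySem.Set Int) (j : Int) :
    j ∈ items.foldl (fun s rq =>
        if Q rq then
          enum.foldl (fun s ic => if R rq ic then PySem.Set.add s ic.1 else s) s
        else s) s ↔
      j ∈ s ∨ ∃ rq ∈ items, Q rq ∧ ∃ p ∈ enum, R rq p = true ∧ p.1 = j := by
  induction items generalizing s with
  | nil => simp
  | cons rq items ih =>
    by_cases h : Q rq
    · simp only [List.foldl_cons, if_pos h, ih, pv_foldl_add_mem, List.mem_cons]
      constructor
      · rintro ((hs | hE) | ⟨q, hq, hQ, hE⟩)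
        · exact Or.inl hs
        · exact Or.inr ⟨rq, Or.inl rfl, h, hE⟩
        · exact Or.inr ⟨q, Or.inr hq, hQ, hE⟩
      · rintro (hs | ⟨q, (rfl | hq), hQ, hE⟩)
        · exact Or.inl (Or.inl hs)
        · exact Or.inl (Or.inr hE)
        · exact Or.inr ⟨q, hq, hQ, hE⟩
    · simp only [List.foldl_cons, if_neg h, ih, List.mem_cons]
      constructor
      · rintro (hs | ⟨q, hq, hQ, hE⟩)
        · exact Or.inl hs
        · exact Or.inr ⟨q, Or.inr hq, hQ, hE⟩
      · rintro (hs | ⟨q, (rfl | hq), hQ, hE⟩)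
        · exact Or.inl hs
        · exact absurd hQ h
        · exact Or.inr ⟨q, hq, hQ, hE⟩

-- a rank occurring with multiplicity ≥ 2 in the Counter's items ↔ its count is ≥ 2
theorem pv_count_mem (ranks : List String) (r : String) :
    (∃ rq ∈ (PySem.Dict.counter ranks).items, 2 ≤ rq.2 ∧ rq.1 = r) ↔
      2 ≤ (PySem.Dict.counter ranks).getD r 0 := by
  rw [PySem.Dict.getD_counter]
  simp only [PySem.Dict.items_counter, List.mem_map]
  constructor
  · rintro ⟨rq, ⟨k, hk, rfl⟩, h2, rfl⟩
    exact h2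
  · intro h2
    have hc : 0 < ranks.count r := by
      by_contra hc
      have : ranks.count r = 0 := by omega
      rw [this] at h2; omega
    exact ⟨(r, (ranks.count r : Int)),
      ⟨r, (PySem.Set.mem_ofList _ _).mpr (List.count_pos_iff.mp hc), rfl⟩, h2, rfl⟩

-- an existential over enumerate(hand) pinned to index i, for i in range(len(hand))
theorem pv_exists_enum {hand : List (List String)} {i : Int}
    (hi : i ∈ PySem.List.pyRange 0 (PySem.List.len hand) 1) (Q : List String → Prop) :
    (∃ p ∈ (PySem.List.pyRange 0 (PySem.List.len hand) 1).map
        (fun j => (j, PySem.List.pyGetD hand j [])), Q p.2 ∧ p.1 = i) ↔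
      Q (PySem.List.pyGetD hand i []) := by
  constructor
  · rintro ⟨p, hp, hQ, hpi⟩
    obtain ⟨j, hj, rfl⟩ := List.mem_map.mp hp
    subst hpi
    exact hQ
  · intro hQ
    exact ⟨(i, PySem.List.pyGetD hand i []), List.mem_map.mpr ⟨i, hi, rfl⟩, hQ, rfl⟩

-- A's result is the range filtered by the negated keep predicate
theorem pv_A_filter (hand : List (List String)) :
    dealer_discard_strategy hand =
      (PySem.List.pyRange 0 (PySem.List.len hand) 1).filter
        (fun i => !(pvKeepCard (pvCount hand) (PySem.List.pyGetD hand i []))) := by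
  unfold dealer_discard_strategy
  dsimp only
  refine List.filter_congr (fun i hi => ?_)
  congr 1
  rw [Bool.eq_iff_iff]
  have hcontains : ∀ (s : PySem.Set Int),
      PySem.Set.contains s i = true ↔ i ∈ s := by
    intro s; simp [PySem.Set.contains]
  rw [hcontains]
  rw [PySem.List.enumerate_eq_map_pyRange hand []]
  rw [pv_foldl_add_mem, pv_foldl_nested_mem, pv_foldl_add_mem]
  rw [pv_exists_enum hi (fun c => pvCard0 c == "JOKER"),
      pv_exists_enum hi (fun c => pvHighs.contains (pvCard0 c))]
  have hpair : (∃ rq ∈ (pvCount hand).items,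
        2 ≤ rq.2 ∧ ∃ p ∈ (PySem.List.pyRange 0 (PySem.List.len hand) 1).map
          (fun j => (j, PySem.List.pyGetD hand j [])), (pvCard0 p.2 == rq.1) = true ∧ p.1 = i) ↔
      2 ≤ (pvCount hand).getD (pvCard0 (PySem.List.pyGetD hand i [])) 0 := by
    rw [pvCount, ← pv_count_mem]
    constructor
    · rintro ⟨rq, hrq, h2, hE⟩
      rw [pv_exists_enum hi (fun c => pvCard0 c == rq.1)] at hE
      exact ⟨rq, hrq, h2, ((beq_iff_eq).mp hE).symm⟩
    · rintro ⟨rq, hrq, h2, hr⟩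
      refine ⟨rq, hrq, h2, ?_⟩
      rw [pv_exists_enum hi (fun c => pvCard0 c == rq.1)]
      exact (beq_iff_eq).mpr hr.symm
  rw [show (PySem.Dict.counter ((hand.filter (fun c => !(pvCard0 c == "JOKER"))).map pvCard0)) = pvCount hand from rfl]
  rw [hpair]
  simp only [pvKeepCard, Bool.or_eq_true, decide_eq_true_eq, beq_iff_eq,
    PySem.Set.empty, List.not_mem_nil, false_or]

-- partitioning a pair list by its (nodup, covering) key list is a permutation of the direct filter
theorem pv_perm_partition (c : String → Bool) :
    ∀ (ks : List String) (l : List (String × Int)), ks.Nodup → (∀ p ∈ l, p.1 ∈ ks) →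
    ((ks.filter c).flatMap (fun r => l.filter (fun p => p.1 == r))).Perm
      (l.filter (fun p => c p.1)) := by
  intro ks
  induction ks with
  | nil =>
    intro l _ hcov
    have : l = [] := by
      cases l with
      | nil => rfl
      | cons p l => exact absurd (hcov p (List.mem_cons_self)) (List.not_mem_nil)
    subst this; simp
  | cons r ks ih =>
    intro l hnd hcov
    have hnd' := (List.nodup_cons.mp hnd).2
    have hr : r ∉ ks := (List.nodup_cons.mp hnd).1
    set l' := l.filter (fun p => !(p.1 == r)) with hl'
    have hcov' : ∀ p ∈ l', p.1 ∈ ks := by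
      intro p hp
      have hm := List.mem_of_mem_filter hp
      have hne : p.1 ≠ r := by
        have h0 := List.of_mem_filter hp
        simpa using h0
      rcases List.mem_cons.mp (hcov p hm) with h | h
      · exact absurd h hne
      · exact h
    have hsame : ∀ r' ∈ ks, l.filter (fun p => p.1 == r') = l'.filter (fun p => p.1 == r') := by
      intro r' hr'
      rw [hl', List.filter_filter]
      refine (List.filter_congr (fun p _ => ?_)).symm
      by_cases h : p.1 = r'
      · have hne : r' ≠ r := fun h' => hr (h' ▸ hr')
        simp [h, hne]
      · simp [h]
    have hIH := ih l' hnd' hcov'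
    have hIH' : ((ks.filter c).flatMap (fun r' => l.filter (fun p => p.1 == r'))).Perm
        (l'.filter (fun p => c p.1)) := by
      rw [List.flatMap_congr (fun r' hr' => hsame r' (List.mem_of_mem_filter hr'))]
      exact hIH
    by_cases hc : c r = true
    · rw [List.filter_cons_of_pos hc, List.flatMap_cons]
      have hsplit : (l.filter (fun p => c p.1)).Perm
          (l.filter (fun p => p.1 == r) ++ l'.filter (fun p => c p.1)) := by
        have h1 : l.filter (fun p => p.1 == r) = (l.filter (fun p => c p.1)).filter (fun p => p.1 == r) := by
          rw [List.filter_filter]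
          refine List.filter_congr (fun p _ => ?_)
          by_cases h : p.1 = r
          · simp [h, hc]
          · simp [h]
        have h2 : l'.filter (fun p => c p.1) = (l.filter (fun p => c p.1)).filter (fun p => !(p.1 == r)) := by
          rw [hl', List.filter_filter, List.filter_filter]
          refine List.filter_congr (fun p _ => ?_)
          rw [Bool.and_comm]
        rw [h1, h2]
        exact (List.filter_append_perm _ _).symm
      exact (hIH'.append_left _).trans hsplit.symm
    · rw [List.filter_cons_of_neg (by simp [hc])]
      refine hIH'.trans ?_
      rw [hl', List.filter_filter]
      refine List.Perm.of_eq (List.filter_congr (fun p _ => ?_))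
      by_cases h : p.1 = r
      · simp [h, hc]
      · simp [h]

-- the multiplicity of rank r in the hand, jokers removed, for r ≠ "JOKER"
theorem pv_count_eq (hand : List (List String)) (r : String) (hr : r ≠ "JOKER") :
    (pvCount hand).getD r 0 = ((hand.map pvCard0).count r : Int) := by
  rw [pvCount, PySem.Dict.getD_counter]
  congr 1
  induction hand with
  | nil => rfl
  | cons ch t ih =>
    by_cases h : pvCard0 ch = "JOKER"
    · simp [h, Ne.symm hr, ih]
    · simp [h, List.count_cons, ih]

theorem pv_main (hand : List (List String)) :
    dealer_discard_strategy hand = dealer_discard_strategy_alt hand := by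
  rw [pv_A_filter]
  unfold dealer_discard_strategy_alt
  dsimp only
  rw [PySem.List.enumerate_eq_map_pyRange hand []]
  -- name the pieces
  set n := PySem.List.len hand with hn
  set R := PySem.List.pyRange 0 n 1 with hR
  set M : List (String × Int) := R.map (fun j => (pvCard0 (PySem.List.pyGetD hand j []), j)) with hM
  -- the grouping fold over enumerate is the canonical modify-append fold over M
  have hfold : (R.map (fun j => (j, PySem.List.pyGetD hand j []))).foldl
      (fun d ic => d.modify (pvCard0 ic.2) [] (· ++ [ic.1]))
      (PySem.Dict.empty : PySem.Dict String (List Int)) =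
      M.foldl (fun d p => d.modify p.1 [] (· ++ [p.2])) PySem.Dict.empty := by
    rw [hM, List.foldl_map, List.foldl_map]
  rw [hfold]
  set groups := M.foldl (fun d p => d.modify p.1 [] (· ++ [p.2]))
    (PySem.Dict.empty : PySem.Dict String (List Int)) with hgroups
  have hnodup : groups.keys.Nodup := by
    rw [hgroups]
    exact PySem.Dict.nodup_keys_foldl_modify_key M (·.1) [] (fun d p => (· ++ [p.2]))
      PySem.Dict.empty (by simp)
  have hgetD : ∀ r, groups.getD r [] = (M.filter (fun p => p.1 == r)).map (·.2) := by
    intro r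
    rw [hgroups, PySem.Dict.getD_foldl_modify_append, PySem.Dict.getD_empty]
    simp
  have hkeys : groups.keys = PySem.Set.ofList (M.map (·.1)) := by
    rw [hgroups, PySem.Dict.keys_foldl_modify_key]
    simp [PySem.Dict.keys_empty, PySem.Set.update, PySem.Set.ofList_eq_foldl]
  -- the collection fold over items is a flatMap over the filtered keys
  set c : String × List Int → Bool :=
    (fun ri => !(ri.1 == "JOKER") && !(pvHighs.contains ri.1) && decide (PySem.List.len ri.2 < 2)) with hc
  have hcollect : groups.items.foldl (fun acc ri => if c ri then acc ++ ri.2 else acc) [] =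
      (groups.items.filter c).flatMap (·.2) := by
    rw [PySem.List.foldl_if_eq_foldl_filter, PySem.List.foldl_append_eq_flatMap]
    simp
  rw [show (groups.items.foldl
      (fun acc ri => if !(ri.1 == "JOKER") && !(pvHighs.contains ri.1) && decide (PySem.List.len ri.2 < 2)
        then acc ++ ri.2 else acc) []) =
      (groups.items.filter c).flatMap (·.2) from hcollect]
  rw [PySem.Dict.items_eq_map_keys groups hnodup []]
  rw [List.filter_map, List.flatMap_map]
  -- pre-sort discard list ~ direct filter of M mapped to indices
  set c' : String → Bool := fun r => c (r, groups.getD r []) with hc'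
  have hperm0 := pv_perm_partition c' (groups.keys) M hnodup
    (by
      intro p hp
      rw [hkeys, PySem.Set.mem_ofList]
      exact List.mem_map.mpr ⟨p, hp, rfl⟩)
  have hperm : ((groups.keys.filter c').flatMap (fun r => groups.getD r [])).Perm
      ((M.filter (fun p => c' p.1)).map (·.2)) := by
    have : (groups.keys.filter c').flatMap (fun r => groups.getD r []) =
        ((groups.keys.filter c').flatMap (fun r => M.filter (fun p => p.1 == r))).map (·.2) := by
      rw [List.map_flatMap]
      exact List.flatMap_congr (fun r _ => (hgetD r).symm ▸ rfl)
    rw [this]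
    exact hperm0.map (·.2)
  -- identify the direct filter with A's filtered range
  have hMkeys : M.map (·.1) = hand.map pvCard0 := by
    have h0 := PySem.List.map_pyGetD_pyRange_zero hand ([] : List String)
    rw [hM]
    calc (List.map (fun j => (pvCard0 (PySem.List.pyGetD hand j []), j)) R).map (·.1)
        = List.map pvCard0 (List.map (fun j => PySem.List.pyGetD hand j []) R) := by
          simp [List.map_map, Function.comp]
      _ = List.map pvCard0 hand := by rw [hR, hn, h0]
  have hpt : ∀ j, c' (pvCard0 (PySem.List.pyGetD hand j [])) =
      !(pvKeepCard (pvCount hand) (PySem.List.pyGetD hand j [])) := by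
    intro j
    set r := pvCard0 (PySem.List.pyGetD hand j []) with hrdef
    have hrhs : pvKeepCard (pvCount hand) (PySem.List.pyGetD hand j []) =
        ((r == "JOKER") || decide (2 ≤ (pvCount hand).getD r 0) || pvHighs.contains r) := by
      simp only [pvKeepCard, ← hrdef]
    rw [hrhs]
    by_cases hj : r = "JOKER"
    · simp [hc', hc, hj]
    · have hlen : PySem.List.len (groups.getD r []) = ((hand.map pvCard0).count r : Int) := by
        rw [hgetD r, PySem.List.len]
        congr 1
        rw [List.length_map, ← List.countP_eq_length_filter, ← hMkeys, List.count]
        simp only [hM, List.countP_map, List.map_map]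
        rfl
      have hcnt := pv_count_eq hand r hj
      simp only [hc', hc, hlen, hcnt]
      by_cases hh : r ∈ pvHighs
      · simp [hh]
      · by_cases h2 : 2 ≤ ((hand.map pvCard0).count r : Int)
        · simp [hh, h2, show ¬ ((hand.map pvCard0).count r : Int) < 2 by omega]
        · simp [hj, hh, h2, show ((hand.map pvCard0).count r : Int) < 2 by omega]
  have hA : (M.filter (fun p => c' p.1)).map (·.2) =
      R.filter (fun i => !(pvKeepCard (pvCount hand) (PySem.List.pyGetD hand i []))) := by
    rw [hM, List.filter_map, List.map_map]
    have h1 : ∀ j ∈ R, ((fun p => c' p.1) ∘ fun j => (pvCard0 (PySem.List.pyGetD hand j []), j)) j =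
        !(pvKeepCard (pvCount hand) (PySem.List.pyGetD hand j [])) := fun j _ => hpt j
    rw [List.filter_congr h1]
    rw [show ((fun x => x.2) ∘ fun j => (pvCard0 (PySem.List.pyGetD hand j []), j)) = id from rfl,
      List.map_id]
  -- A's filtered range is strictly increasing
  have hpw : (R.filter (fun i => !(pvKeepCard (pvCount hand) (PySem.List.pyGetD hand i [])))).Pairwise (· < ·) := by
    exact List.Pairwise.filter _ (by rw [hR]; exact PySem.List.pairwise_lt_pyRange_one 0 n)
  have hperm2 : (R.filter (fun i => !(pvKeepCard (pvCount hand) (PySem.List.pyGetD hand i [])))).Perm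
      ((groups.keys.filter c').flatMap (fun r => groups.getD r [])) := (hA ▸ hperm).symm
  exact (PySem.List.sorted_eq_of_perm_of_pairwise_lt _ _ (fun x => x) hperm2 hpw).symm

-- ===== VERDICT (by name: the statement is the Claim_ definition above) =====
theorem dealer_discard_strategy_spec : Claim_equal_dealer_discard_strategy := by
  intro hand _ _
  unfold Spec_dealer_discard_strategy
  exact pv_main hand
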